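-- pv_equiv track=rewrite | github.com/kkongnyang2/game-cheat | code/dump/watch_data_ranges.py | _segments_from_bucket
-- ===== SOURCE A (Python) =====
-- def _segments_from_bucket(values, gap_pages):
--     """Split sorted values into subsegments whenever gap > gap_pages pages"""
--     if not values:
--         return []
--     values = sorted(values)
--     segs = [[values[0], values[0]]]
--     last = values[0]
--     max_gap = gap_pages * PAGE
--     for v in values[1:]:
--         if v - last > max_gap:
--             segs.append([v, v])
--         else:
--             segs[-1][1] = v
--         last = v
--     return segs
--
-- PAGE = 0x1000
-- ===== SOURCE B (Python) =====
-- PAGE = 0x1000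
--
--
-- def _segments_from_bucket(values, gap_pages):
--     """Split sorted values into subsegments whenever gap > gap_pages pages"""
--     vs = sorted(values)
--     if not vs:
--         return []
--     n = len(vs)
--     max_gap = gap_pages * PAGE
--     bounds = [0] + [i for i in range(1, n) if vs[i] - vs[i - 1] > max_gap] + [n]
--     return [[vs[a], vs[b - 1]] for a, b in zip(bounds, bounds[1:])]
-- ===== Notes on version B (the rewrite author's own statement) =====
-- stated objective: alternative
-- what changed: Replaces A's fused incremental pass (append [v,v] and mutate the last segment's end per element) with a two-phase computation: first collect all breakpoint indices where consecutive sorted values differ by more than gap_pages*PAGE, then emit one segment [vs[a], vs[b-1]] per adjacent pair of boundaries.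
import Mathlib
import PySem

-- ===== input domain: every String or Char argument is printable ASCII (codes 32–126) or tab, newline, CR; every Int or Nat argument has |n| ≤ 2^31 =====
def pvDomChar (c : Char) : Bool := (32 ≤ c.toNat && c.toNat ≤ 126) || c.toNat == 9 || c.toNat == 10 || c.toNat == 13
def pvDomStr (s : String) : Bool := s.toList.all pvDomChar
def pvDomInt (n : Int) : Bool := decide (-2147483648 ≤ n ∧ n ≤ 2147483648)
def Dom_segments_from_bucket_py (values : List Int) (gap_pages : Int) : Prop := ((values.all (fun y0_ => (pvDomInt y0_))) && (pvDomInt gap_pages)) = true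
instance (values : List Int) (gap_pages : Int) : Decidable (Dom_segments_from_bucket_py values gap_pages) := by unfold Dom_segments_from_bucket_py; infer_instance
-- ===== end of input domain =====

-- B replaces A's fused pass (append [v,v] / mutate last segment's end) by a two-phase
-- computation: collect breakpoint indices, then emit one segment per boundary pair; equal cost.

-- ===== PORT A =====
-- segs[-1][1] = v  (segs is always nonempty with pair-shaped entries when A executes this)
def setLastSnd (segs : List (List Int)) (v : Int) : List (List Int) :=
  segs.dropLast ++ [(segs.getLastD []).set 1 v]

-- the 'for v in values[1:]' loop, state (segs, last)
def aLoop (max_gap : Int) (segs : List (List Int)) (last : Int) : List Int → List (List Int)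
  | [] => segs
  | v :: rest =>
      if v - last > max_gap then aLoop max_gap (segs ++ [[v, v]]) v rest
      else aLoop max_gap (setLastSnd segs v) v rest

def segments_from_bucket_py (values : List Int) (gap_pages : Int) : List (List Int) :=
  if values = [] then []
  else
    let vs := PySem.List.sorted values (fun x => x) false
    let v0 := vs.headD 0  -- values[0]; vs is nonempty here, so exact
    aLoop (gap_pages * 4096) [[v0, v0]] v0 (PySem.List.slice vs (some 1) none)  -- PAGE = 0x1000

-- ===== PORT B =====
def segments_from_bucket_py_alt (values : List Int) (gap_pages : Int) : List (List Int) :=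
  let vs := PySem.List.sorted values (fun x => x) false
  if vs = [] then []
  else
    let n : Int := vs.length
    let mg := gap_pages * 4096  -- PAGE = 0x1000
    -- bounds = [0] + [i for i in range(1, n) if vs[i] - vs[i-1] > max_gap] + [n]
    -- indices i and i-1 are nonnegative and in range, so getD is exact for vs[...]
    let bounds : List Int :=
      0 :: ((PySem.List.pyRange 1 n 1).filter
              (fun i => decide (vs.getD i.toNat 0 - vs.getD (i - 1).toNat 0 > mg)) ++ [n])
    -- [[vs[a], vs[b-1]] for a, b in zip(bounds, bounds[1:])]
    (bounds.zip (PySem.List.slice bounds (some 1) none)).map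
      (fun p => [vs.getD p.1.toNat 0, vs.getD (p.2 - 1).toNat 0])

-- ===== PRECONDITION & SPEC =====
def Spec_segments_from_bucket_py (values : List Int) (gap_pages : Int) (out : List (List Int)) : Prop := out = segments_from_bucket_py_alt values gap_pages
instance (values : List Int) (gap_pages : Int) (out : List (List Int)) : Decidable (Spec_segments_from_bucket_py values gap_pages out) := by unfold Spec_segments_from_bucket_py; infer_instance

-- ===== CLAIM (what is proved, stated in full; the proofs are below) =====
def Claim_equal_segments_from_bucket_py : Prop := ∀ (values : List Int) (gap_pages : Int), Dom_segments_from_bucket_py values gap_pages → Spec_segments_from_bucket_py values gap_pages (segments_from_bucket_py values gap_pages)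

-- ===== LEMMAS AND PROOFS =====

-- reference run decomposition both ports reduce to
def takeRun (mg hi : Int) : List Int → Int × List Int
  | [] => (hi, [])
  | v :: rest => if v - hi ≤ mg then takeRun mg v rest else (hi, v :: rest)

def runGo (mg : Int) : List Int → List (List Int)
  | [] => []
  | v :: rest => [v, (takeRun mg v rest).1] :: runGo mg (takeRun mg v rest).2
  termination_by l => l.length
  decreasing_by
    have hlen : ∀ (l : List Int) (hi : Int), (takeRun mg hi l).2.length ≤ l.length := by
      intro l
      induction l with
      | nil => intro _; simp [takeRun]
      | cons x xs ih =>
          intro hi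
          simp only [takeRun]
          split
          · exact Nat.le_trans (ih x) (Nat.le_succ _)
          · simp
    have := hlen rest v
    simp only [List.length_cons]
    omega

theorem runGo_nil (mg : Int) : runGo mg [] = [] := by
  unfold runGo
  rfl

theorem runGo_cons (mg v : Int) (rest : List Int) :
    runGo mg (v :: rest) = [v, (takeRun mg v rest).1] :: runGo mg (takeRun mg v rest).2 := by
  conv_lhs => unfold runGo

theorem aLoop_runGo (mg : Int) (l : List Int) :
    ∀ (init : List (List Int)) (a b : Int),
      aLoop mg (init ++ [[a, b]]) b l =
        init ++ ([a, (takeRun mg b l).1] :: runGo mg (takeRun mg b l).2) := by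
  induction l with
  | nil => intro init a b; simp [aLoop, takeRun, runGo_nil]
  | cons v rest ih =>
      intro init a b
      by_cases h : v - b ≤ mg
      · have h' : ¬ v - b > mg := by omega
        have hset : setLastSnd (init ++ [[a, b]]) v = init ++ [[a, v]] := by simp [setLastSnd]
        rw [aLoop, if_neg h', hset, ih init a v, takeRun, if_pos h]
      · have h' : v - b > mg := by omega
        rw [aLoop, if_pos h', takeRun, if_neg h]
        have hrec := ih (init ++ [[a, b]]) v v
        rw [hrec]
        simp [runGo_cons]

theorem drop_cons_getD (vs : List Int) (j : Nat) (h : j < vs.length) :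
    vs.drop j = vs.getD j 0 :: vs.drop (j + 1) := by
  rw [List.drop_eq_getElem_cons h, List.getD_eq_getElem vs 0 h]

-- first index ≥ j at which the run starting before j ends (proof-side helper)
def fb (vs : List Int) (n : Nat) (mg : Int) (j : Nat) : Nat :=
  if _h : j < n ∧ vs.getD j 0 - vs.getD (j - 1) 0 ≤ mg then fb vs n mg (j + 1) else j
  termination_by n - j

theorem le_fb (vs : List Int) (n : Nat) (mg : Int) (j : Nat) : j ≤ fb vs n mg j := by
  unfold fb
  split
  · exact Nat.le_trans (Nat.le_succ j) (le_fb vs n mg (j + 1))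
  · exact Nat.le_refl j
  termination_by n - j

theorem fb_le (vs : List Int) (n : Nat) (mg : Int) (j : Nat) (h : j ≤ n) : fb vs n mg j ≤ n := by
  unfold fb
  split
  · rename_i hc
    exact fb_le vs n mg (j + 1) (by omega)
  · exact h
  termination_by n - j

theorem fb_stop (vs : List Int) (n : Nat) (mg : Int) (j : Nat) :
    fb vs n mg j < n → vs.getD (fb vs n mg j) 0 - vs.getD (fb vs n mg j - 1) 0 > mg := by
  unfold fb
  split
  · exact fb_stop vs n mg (j + 1)
  · rename_i hc
    intro h
    have := not_and.mp hc h
    omega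
  termination_by n - j

theorem fb_takeRun (vs : List Int) (mg : Int) (j : Nat) (h0 : 0 < j) :
    takeRun mg (vs.getD (j - 1) 0) (vs.drop j) =
      (vs.getD (fb vs vs.length mg j - 1) 0, vs.drop (fb vs vs.length mg j)) := by
  unfold fb
  split
  · rename_i h
    obtain ⟨hj, hle⟩ := h
    rw [drop_cons_getD vs j hj, takeRun, if_pos hle]
    have hrec := fb_takeRun vs mg (j + 1) (by omega)
    simpa using hrec
  · rename_i h
    by_cases hj : j < vs.length
    · have hle : ¬ vs.getD j 0 - vs.getD (j - 1) 0 ≤ mg := by tauto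
      rw [drop_cons_getD vs j hj, takeRun, if_neg hle, ← drop_cons_getD vs j hj]
    · have hd : vs.drop j = [] := List.drop_eq_nil_of_le (by omega)
      rw [hd, takeRun]
  termination_by vs.length - j

-- recursive rendering of 'zip(a :: l, l) |>.map step'
def pairsMap (vs : List Int) : Int → List Int → List (List Int)
  | _, [] => []
  | a, b :: bs => [vs.getD a.toNat 0, vs.getD (b - 1).toNat 0] :: pairsMap vs b bs

theorem zip_map_pairsMap (vs : List Int) (l : List Int) :
    ∀ a : Int, (((a :: l).zip l).map
        (fun p => [vs.getD p.1.toNat 0, vs.getD (p.2 - 1).toNat 0])) = pairsMap vs a l := by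
  induction l with
  | nil => intro a; rfl
  | cons b bs ih =>
      intro a
      simp only [List.zip_cons_cons, List.map_cons, pairsMap]
      rw [ih b]

-- the break predicate of port B
def brk (vs : List Int) (mg : Int) (i : Int) : Bool :=
  decide (vs.getD i.toNat 0 - vs.getD (i - 1).toNat 0 > mg)

-- indices up to the first break fail the predicate, so the filter skips them
theorem filter_skip (vs : List Int) (mg : Int) (j : Nat) :
    ((PySem.List.pyRange (j : Int) (vs.length : Int) 1).filter (brk vs mg)) =
      ((PySem.List.pyRange ((fb vs vs.length mg j : Nat) : Int) (vs.length : Int) 1).filter (brk vs mg)) := by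
  unfold fb
  split
  · rename_i h
    obtain ⟨hj, hle⟩ := h
    have hcons : PySem.List.pyRange (j : Int) (vs.length : Int) 1 =
        (j : Int) :: PySem.List.pyRange ((j : Int) + 1) (vs.length : Int) 1 :=
      PySem.List.pyRange_one_cons (by exact_mod_cast hj)
    have hfalse : brk vs mg (j : Int) = false := by
      simp only [brk, decide_eq_false_iff_not]
      have h1 : ((j : Int)).toNat = j := by omega
      have h2 : ((j : Int) - 1).toNat = j - 1 := by omega
      rw [h1, h2]
      omega
    rw [hcons, List.filter_cons, hfalse]
    simp only [Bool.false_eq_true, if_false]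
    have := filter_skip vs mg (j + 1)
    simpa using this
  · rfl
  termination_by vs.length - j

-- main bridge: B's boundary pairs starting at i compute the run decomposition of vs.drop i
theorem pairsMap_runGo (vs : List Int) (mg : Int) (i : Nat) (hi : i < vs.length) :
    pairsMap vs (i : Int)
        (((PySem.List.pyRange ((i : Int) + 1) (vs.length : Int) 1).filter (brk vs mg)) ++
          [(vs.length : Int)]) = runGo mg (vs.drop i) := by
  have hJle : i + 1 ≤ fb vs vs.length mg (i + 1) := le_fb vs vs.length mg (i + 1)
  have hJn : fb vs vs.length mg (i + 1) ≤ vs.length := fb_le vs vs.length mg (i + 1) (by omega)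
  set J := fb vs vs.length mg (i + 1) with hJ
  have htr := fb_takeRun vs mg (i + 1) (by omega)
  simp only [Nat.add_sub_cancel] at htr
  have hskip : ((PySem.List.pyRange ((i : Int) + 1) (vs.length : Int) 1).filter (brk vs mg)) =
      ((PySem.List.pyRange ((J : Nat) : Int) (vs.length : Int) 1).filter (brk vs mg)) := by
    have := filter_skip vs mg (i + 1)
    simpa using this
  rw [drop_cons_getD vs i hi, runGo_cons, htr, hskip]
  by_cases hJlt : J < vs.length
  · have hpred : brk vs mg ((J : Nat) : Int) = true := by
      simp only [brk, decide_eq_true_eq]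
      have h1 : (((J : Nat) : Int)).toNat = J := by omega
      have h2 : (((J : Nat) : Int) - 1).toNat = J - 1 := by omega
      rw [h1, h2]
      exact fb_stop vs vs.length mg (i + 1) hJlt
    have hcons : PySem.List.pyRange ((J : Nat) : Int) (vs.length : Int) 1 =
        ((J : Nat) : Int) :: PySem.List.pyRange (((J : Nat) : Int) + 1) (vs.length : Int) 1 :=
      PySem.List.pyRange_one_cons (by exact_mod_cast hJlt)
    rw [hcons, List.filter_cons, hpred]
    simp only [if_true]
    rw [List.cons_append, pairsMap]
    have h1 : (((i : Nat) : Int)).toNat = i := by omega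
    have h2 : ((((J : Nat) : Int)) - 1).toNat = J - 1 := by omega
    rw [h1, h2]
    have hrec := pairsMap_runGo vs mg J hJlt
    have hcast : (((J : Nat) : Int) + 1) = (((J + 1 : Nat)) : Int) := by push_cast; ring
    rw [hcast] at hrec ⊢
    have hcast2 : (((J : Nat)) : Int) + 1 = ((J + 1 : Nat) : Int) := by push_cast; ring
    rw [hrec]
  · have hJeq : J = vs.length := by omega
    have hnil : PySem.List.pyRange ((J : Nat) : Int) (vs.length : Int) 1 = [] :=
      PySem.List.pyRange_one_eq_nil (by exact_mod_cast Nat.le_of_eq hJeq.symm)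
    rw [hnil]
    simp only [List.filter_nil, List.nil_append, pairsMap]
    have h1 : (((i : Nat) : Int)).toNat = i := by omega
    have h2 : (((vs.length : Nat) : Int) - 1).toNat = vs.length - 1 := by omega
    rw [h1, h2, ← hJ, hJeq]
    have hd : vs.drop vs.length = [] := List.drop_eq_nil_of_le (le_refl _)
    rw [hd, runGo_nil]
  termination_by vs.length - i
  decreasing_by omega

-- ===== VERDICT (by name: the statement is the Claim_ definition above) =====
theorem segments_from_bucket_py_spec : Claim_equal_segments_from_bucket_py := by
  intro values gap_pages _
  unfold Spec_segments_from_bucket_py segments_from_bucket_py segments_from_bucket_py_alt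
  by_cases hv : values = []
  · subst hv
    simp [PySem.List.sorted]
  · rw [if_neg hv]
    have hlen : (PySem.List.sorted values (fun x => x) false).length = values.length :=
      (PySem.List.sorted_perm values (fun x => x) false).length_eq
    have hne : PySem.List.sorted values (fun x => x) false ≠ [] := by
      intro h
      apply hv
      rw [h] at hlen
      exact List.eq_nil_of_length_eq_zero hlen.symm
    set vs := PySem.List.sorted values (fun x => x) false with hvs
    rw [if_neg hne]
    obtain ⟨v0, rest, hcons⟩ := List.exists_cons_of_ne_nil hne
    -- B side
    have hslice : PySem.List.slice
        (0 :: ((PySem.List.pyRange 1 (vs.length : Int) 1).filter (brk vs (gap_pages * 4096)) ++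
          [(vs.length : Int)])) (some 1) none =
        ((PySem.List.pyRange 1 (vs.length : Int) 1).filter (brk vs (gap_pages * 4096)) ++
          [(vs.length : Int)]) := by
      rw [PySem.List.slice_from_one]
      rfl
    have hB := zip_map_pairsMap vs
      ((PySem.List.pyRange 1 (vs.length : Int) 1).filter (brk vs (gap_pages * 4096)) ++
        [(vs.length : Int)]) 0
    have h0 : 0 < vs.length := by rw [hcons]; simp
    have hmain := pairsMap_runGo vs (gap_pages * 4096) 0 h0
    simp only [Nat.cast_zero, zero_add, List.drop_zero] at hmain
    -- A side
    have hA := aLoop_runGo (gap_pages * 4096) rest [] v0 v0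
    simp only [List.nil_append] at hA
    dsimp only
    have hbrk : (fun i : Int => decide (vs.getD i.toNat 0 - vs.getD (i - 1).toNat 0 > gap_pages * 4096)) = brk vs (gap_pages * 4096) := rfl
    rw [hbrk, hslice, hB, hmain, hcons, PySem.List.slice_from_one, List.tail_cons,
      List.headD_cons, hA, ← runGo_cons]
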